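-- pv_equiv track=rewrite | github.com/jin-ryu/Algorithm-Team-Notes | Algorithm/구현/시각.py | solution
-- ===== SOURCE A (Python) =====
-- def solution(N):
--     count = 0
--
--     for hour in range(N+1):
--         for minute in range(0, 60):
--             for second in range(0, 60):
--                 if '3' in set(str(hour) + str(minute) + str(second)):
--                     count += 1
--
--     return count
-- ===== SOURCE B (Python) =====
-- def _pairs_with_3():
--     # number of (minute, second) pairs whose decimal digits contain '3'
--     return sum(1 for m in range(60) for s in range(60) if '3' in str(m) + str(s))
--
-- def solution(N):
--     # B: precompute the minute/second count once; each hour is then O(1).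
--     pairs3 = _pairs_with_3()
--     total = 0
--     for hour in range(N + 1):
--         total += 3600 if '3' in str(hour) else pairs3
--     return total
-- ===== Notes on version B (the rewrite author's own statement) =====
-- stated objective: faster
-- what changed: B precomputes the number of minute/second pairs containing the digit three once and replaces A's full inner double loop per hour by a single O(1) check whether the hour's decimal digits contain that digit.
import Mathlib
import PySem

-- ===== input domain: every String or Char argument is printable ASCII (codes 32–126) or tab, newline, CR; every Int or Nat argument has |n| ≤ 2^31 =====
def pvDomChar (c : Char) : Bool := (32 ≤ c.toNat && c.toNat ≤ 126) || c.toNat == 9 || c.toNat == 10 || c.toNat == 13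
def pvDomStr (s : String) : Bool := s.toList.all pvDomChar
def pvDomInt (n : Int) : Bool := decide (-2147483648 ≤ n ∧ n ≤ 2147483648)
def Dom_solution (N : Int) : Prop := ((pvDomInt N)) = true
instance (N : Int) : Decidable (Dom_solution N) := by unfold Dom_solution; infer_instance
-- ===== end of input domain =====

-- B replaces A's inner double loop per hour by a precomputed minute/second
-- count plus an O(1) digit check on the hour (objective: faster).

-- ===== PORT A =====
def solution (N : Int) : Int :=
  (PySem.List.pyRange 0 (N + 1) 1).foldl (fun count hour =>
    (PySem.List.pyRange 0 60 1).foldl (fun count minute =>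
      (PySem.List.pyRange 0 60 1).foldl (fun count second =>
        if PySem.Set.contains
            (PySem.Set.ofList
              (PySem.Int.toChars hour ++ PySem.Int.toChars minute ++ PySem.Int.toChars second)) '3'
        then count + 1 else count) count) count) 0

-- ===== PORT B =====
-- helper: number of (minute, second) pairs whose decimal digits contain '3'
def pairsWith3 : Int :=
  (PySem.List.pyRange 0 60 1).foldl (fun acc m =>
    (PySem.List.pyRange 0 60 1).foldl (fun acc s =>
      if PySem.Chars.isIn ['3'] (PySem.Int.toChars m ++ PySem.Int.toChars s)
      then acc + 1 else acc) acc) 0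

def solution_alt (N : Int) : Int :=
  let pairs3 := pairsWith3
  (PySem.List.pyRange 0 (N + 1) 1).foldl (fun total hour =>
    total + (if PySem.Chars.isIn ['3'] (PySem.Int.toChars hour) then 3600 else pairs3)) 0

-- ===== PRECONDITION & SPEC =====
def Spec_solution (N : Int) (out : Int) : Prop := out = solution_alt N
instance (N : Int) (out : Int) : Decidable (Spec_solution N out) := by unfold Spec_solution; infer_instance

-- ===== CLAIM (what is proved, stated in full; the proofs are below) =====
def Claim_equal_solution : Prop := ∀ (N : Int), Dom_solution N → Spec_solution N (solution N)

-- ===== LEMMAS AND PROOFS =====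

-- '3' occurs in a char list iff the singleton substring test succeeds
lemma isIn3_iff (l : List Char) : PySem.Chars.isIn ['3'] l = true ↔ '3' ∈ l := by
  rw [PySem.Chars.isIn_iff_infix, List.singleton_infix_iff]

-- A's per-iteration condition, unfolded to a plain membership disjunction
lemma condA_iff (h m s : Int) :
    PySem.Set.contains
      (PySem.Set.ofList (PySem.Int.toChars h ++ PySem.Int.toChars m ++ PySem.Int.toChars s)) '3' = true
    ↔ '3' ∈ PySem.Int.toChars h ∨ '3' ∈ PySem.Int.toChars m ++ PySem.Int.toChars s := by
  rw [PySem.Set.contains_iff, PySem.Set.mem_ofList, List.append_assoc, List.mem_append]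

-- A's inner double loop over minutes/seconds, for a fixed hour
set_option maxHeartbeats 1000000 in
lemma innerA_eq (h : Int) (acc : Int) :
    (PySem.List.pyRange 0 60 1).foldl (fun count minute =>
      (PySem.List.pyRange 0 60 1).foldl (fun count second =>
        if PySem.Set.contains
            (PySem.Set.ofList
              (PySem.Int.toChars h ++ PySem.Int.toChars minute ++ PySem.Int.toChars second)) '3'
        then count + 1 else count) count) acc
    = acc + (if PySem.Chars.isIn ['3'] (PySem.Int.toChars h) then 3600 else pairsWith3) := by
  simp only [PySem.List.foldl_count_if, PySem.List.foldl_add]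
  by_cases hp : '3' ∈ PySem.Int.toChars h
  · rw [if_pos ((isIn3_iff _).mpr hp)]
    have hcount : ∀ m : Int,
        (PySem.List.pyRange 0 60 1).countP
          (fun s => PySem.Set.contains
            (PySem.Set.ofList
              (PySem.Int.toChars h ++ PySem.Int.toChars m ++ PySem.Int.toChars s)) '3') = 60 := by
      intro m
      have : (PySem.List.pyRange 0 60 1).countP
          (fun s => PySem.Set.contains
            (PySem.Set.ofList
              (PySem.Int.toChars h ++ PySem.Int.toChars m ++ PySem.Int.toChars s)) '3')
          = (PySem.List.pyRange 0 60 1).countP (fun _ => true) := by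
        apply List.countP_congr
        intro s _
        exact iff_of_true ((condA_iff h m s).mpr (Or.inl hp)) rfl
      rw [this, List.countP_true, PySem.List.length_pyRange_one]
      decide
    have hmap : ((PySem.List.pyRange 0 60 1).map (fun m =>
          (((PySem.List.pyRange 0 60 1).countP
            (fun s => PySem.Set.contains
              (PySem.Set.ofList
                (PySem.Int.toChars h ++ PySem.Int.toChars m ++ PySem.Int.toChars s)) '3') : Nat) : Int)))
        = (PySem.List.pyRange 0 60 1).map (fun _ => (60 : Int)) := by
      apply List.map_congr_left
      intro m _
      rw [hcount m]
      decide
    rw [hmap, PySem.List.sum_map_const_int, PySem.List.length_pyRange_one]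
    norm_num
  · rw [if_neg (by simp [isIn3_iff, hp])]
    have hcond : ∀ m s : Int,
        PySem.Set.contains
          (PySem.Set.ofList
            (PySem.Int.toChars h ++ PySem.Int.toChars m ++ PySem.Int.toChars s)) '3'
        = PySem.Chars.isIn ['3'] (PySem.Int.toChars m ++ PySem.Int.toChars s) := by
      intro m s
      rw [Bool.eq_iff_iff, condA_iff, isIn3_iff]
      tauto
    have : pairsWith3 = ((PySem.List.pyRange 0 60 1).map (fun m =>
        (((PySem.List.pyRange 0 60 1).countP (fun s =>
          PySem.Chars.isIn ['3'] (PySem.Int.toChars m ++ PySem.Int.toChars s)) : Nat) : Int))).sum := by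
      simp only [pairsWith3, PySem.List.foldl_count_if, PySem.List.foldl_add, zero_add]
    rw [this]
    have hmaps : ((PySem.List.pyRange 0 60 1).map (fun m =>
        (((PySem.List.pyRange 0 60 1).countP
          (fun s => PySem.Set.contains
            (PySem.Set.ofList
              (PySem.Int.toChars h ++ PySem.Int.toChars m ++ PySem.Int.toChars s)) '3') : Nat) : Int)))
        = ((PySem.List.pyRange 0 60 1).map (fun m =>
        (((PySem.List.pyRange 0 60 1).countP (fun s =>
          PySem.Chars.isIn ['3'] (PySem.Int.toChars m ++ PySem.Int.toChars s)) : Nat) : Int))) := by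
      apply List.map_congr_left
      intro m _
      have hc : ((PySem.List.pyRange 0 60 1).countP
          (fun s => PySem.Set.contains
            (PySem.Set.ofList
              (PySem.Int.toChars h ++ PySem.Int.toChars m ++ PySem.Int.toChars s)) '3'))
          = ((PySem.List.pyRange 0 60 1).countP (fun s =>
            PySem.Chars.isIn ['3'] (PySem.Int.toChars m ++ PySem.Int.toChars s))) := by
        apply List.countP_congr
        intro s _
        rw [hcond m s]
      rw [hc]
    rw [hmaps]

theorem solution_spec_aux (N : Int) : solution N = solution_alt N := by
  unfold solution solution_alt
  apply PySem.List.foldl_congr_mem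
  intro count hour _
  exact innerA_eq hour count

-- ===== VERDICT (by name: the statement is the Claim_ definition above) =====
theorem solution_spec : Claim_equal_solution := by
  intro N _
  unfold Spec_solution
  exact solution_spec_aux N
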